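-- pv_equiv track=rewrite | github.com/wbadria/PythonCalculator | main.py | input_process
-- ===== SOURCE A (Python) =====
-- def input_process(equation):
--     """Separates numbers from text. Returns two numbers and an operator"""
--     # Removes spaces from the input and stores it in the join_string
--     joined_string = "%s" % ("".join(equation.split(" ")))
--     new_string = ""
--     num1 = ""
--     op = ""
--     num2 = ""
--     # Finds the first number whether an integer or decimal
--     for char in joined_string:
--         if char.isdigit() or char == ".":
--             num1 += char
--         else:
--             # Break when facing anything other than a number or a dot "."
--             # and store the rest in the variable new_string after removing num1 from joined_string
--             new_string = joined_string.removeprefix(num1)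
--             break
--     # This loop will search within new_string to find the second number
--     for char in new_string:
--         if char.isdigit() or char == ".":
--             num2 += char
--         # Values other than numbers and ".", will be the operation
--         else:
--             op += char
--     return num1, op, num2
-- ===== SOURCE B (Python) =====
-- def input_process(equation):
--     """Separates numbers from text. Returns two numbers and an operator"""
--     num1 = ""
--     op = ""
--     num2 = ""
--     in_head = True
--     for char in "".join(equation.split(" ")):
--         if char.isdigit() or char == ".":
--             if in_head:
--                 num1 += char
--             else:
--                 num2 += char
--         else:
--             in_head = False
--             op += char
--     return num1, op, num2
-- ===== Notes on version B (the rewrite author's own statement) =====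
-- stated objective: simpler
-- what changed: A's two staged loops (a prefix scan with break plus removeprefix, then a classifying loop over the remainder) are fused into ONE pass with a mode flag: each character is routed to num1 while the flag is up, the first non-number character lowers it, and thereafter digits/dots go to num2 and the rest to op; no slicing or removeprefix is ever computed.
import Mathlib
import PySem

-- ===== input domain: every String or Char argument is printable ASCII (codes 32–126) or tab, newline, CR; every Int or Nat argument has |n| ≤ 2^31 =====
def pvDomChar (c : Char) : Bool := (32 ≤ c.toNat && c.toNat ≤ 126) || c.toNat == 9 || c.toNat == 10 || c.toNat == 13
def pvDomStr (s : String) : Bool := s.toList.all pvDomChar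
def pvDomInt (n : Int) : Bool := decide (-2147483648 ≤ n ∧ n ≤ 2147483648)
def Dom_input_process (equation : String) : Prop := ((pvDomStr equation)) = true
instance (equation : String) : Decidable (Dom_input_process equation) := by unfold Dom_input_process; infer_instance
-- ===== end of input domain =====

-- B fuses A's two staged loops (prefix scan with break + removeprefix, then a classifying
-- second loop) into ONE pass with a mode flag routing each character (simpler, same cost).

-- ===== PORT A =====
-- str.removeprefix(p): drop p if it is a prefix, else unchanged (exact)
def pvRemoveprefix (s p : List Char) : List Char :=
  if PySem.Chars.startswith s p then s.drop p.length else s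

-- first 'for' loop of A: accumulate num1 until the break; at the break new_string
-- becomes joined.removeprefix(num1); falling off the end leaves new_string = ""
def pvALoop1 (joined : List Char) : List Char → List Char → List Char × List Char
  | [], num1 => (num1, [])
  | c :: rest, num1 =>
    if PySem.Chars.isdigit c || c == '.' then pvALoop1 joined rest (num1 ++ [c])
    else (num1, pvRemoveprefix joined num1)

def input_process (equation : String) : String × String × String :=
  let joined := PySem.Chars.join [] ((PySem.Chars.split? equation.toList [' ']).getD [])
  let r1 := pvALoop1 joined joined []
  -- second 'for' loop: acc = (num2, op)
  let r2 := r1.2.foldl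
    (fun (acc : List Char × List Char) c =>
      if PySem.Chars.isdigit c || c == '.' then (acc.1 ++ [c], acc.2) else (acc.1, acc.2 ++ [c]))
    ([], [])
  (String.ofList r1.1, String.ofList r2.2, String.ofList r2.1)

-- ===== PORT B =====
-- the body of B's single loop: state acc = ((num1, op, num2), in_head)
def pvBStep (acc : (List Char × List Char × List Char) × Bool) (char : Char) :
    (List Char × List Char × List Char) × Bool :=
  if PySem.Chars.isdigit char || char == '.' then
    if acc.2 then ((acc.1.1 ++ [char], acc.1.2.1, acc.1.2.2), acc.2)
    else ((acc.1.1, acc.1.2.1, acc.1.2.2 ++ [char]), acc.2)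
  else ((acc.1.1, acc.1.2.1 ++ [char], acc.1.2.2), false)

def input_process_alt (equation : String) : String × String × String :=
  let r := (PySem.Chars.join [] ((PySem.Chars.split? equation.toList [' ']).getD [])).foldl
    pvBStep (([], [], []), true)
  (String.ofList r.1.1, String.ofList r.1.2.1, String.ofList r.1.2.2)

-- ===== PRECONDITION & SPEC =====
def Spec_input_process (equation : String) (out : String × String × String) : Prop := out = input_process_alt equation
instance (equation : String) (out : String × String × String) : Decidable (Spec_input_process equation out) := by unfold Spec_input_process; infer_instance

-- ===== CLAIM (what is proved, stated in full; the proofs are below) =====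
def Claim_equal_input_process : Prop := ∀ (equation : String), Dom_input_process equation → Spec_input_process equation (input_process equation)

-- ===== LEMMAS AND PROOFS =====

-- A's first loop computes the takeWhile/dropWhile split of joined
theorem pvALoop1_eq (rem num1 : List Char)
    (h : ∀ c ∈ num1, (PySem.Chars.isdigit c || (c == '.')) = true) :
    pvALoop1 (num1 ++ rem) rem num1 =
      (num1 ++ rem.takeWhile (fun c => PySem.Chars.isdigit c || c == '.'),
       rem.dropWhile (fun c => PySem.Chars.isdigit c || c == '.')) := by
  induction rem generalizing num1 with
  | nil => simp [pvALoop1]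
  | cons c rest ih =>
    by_cases hc : (PySem.Chars.isdigit c || (c == '.')) = true
    · have hrec := ih (num1 ++ [c]) (by
        intro x hx
        rcases List.mem_append.1 hx with hx | hx
        · exact h x hx
        · simpa [List.mem_singleton.1 hx] using hc)
      rw [List.append_assoc, List.singleton_append] at hrec
      simp only [pvALoop1, hc, if_true]
      rw [hrec]
      simp [hc, List.append_assoc]
    · have hpre : PySem.Chars.startswith (num1 ++ c :: rest) num1 = true :=
        (PySem.Chars.startswith_iff _ _).2 ⟨c :: rest, rfl⟩
      simp [pvALoop1, hc, pvRemoveprefix, hpre]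

-- A's second loop is two filters
theorem pvALoop2_eq (l : List Char) (acc : List Char × List Char) :
    l.foldl
      (fun (acc : List Char × List Char) c =>
        if PySem.Chars.isdigit c || c == '.' then (acc.1 ++ [c], acc.2) else (acc.1, acc.2 ++ [c]))
      acc =
      (acc.1 ++ l.filter (fun c => PySem.Chars.isdigit c || c == '.'),
       acc.2 ++ l.filter (fun c => !(PySem.Chars.isdigit c || c == '.'))) := by
  induction l generalizing acc with
  | nil => simp
  | cons c rest ih =>
    cases hc : (PySem.Chars.isdigit c || (c == '.')) with
    | true =>
      rw [List.foldl_cons, if_pos hc, ih]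
      simp [List.filter_cons, hc]
      intro h
      rw [h] at hc
      simpa using hc
    | false =>
      rw [List.foldl_cons, if_neg (by rw [hc]; simp), ih]
      simp [List.filter_cons, hc]
      simpa using hc

-- once the flag is down, B's loop appends the two filters to op and num2
theorem pvBLoop_false (l n1 o n2 : List Char) :
    l.foldl pvBStep ((n1, o, n2), false) =
      ((n1, o ++ l.filter (fun c => !(PySem.Chars.isdigit c || c == '.')),
        n2 ++ l.filter (fun c => PySem.Chars.isdigit c || c == '.')), false) := by
  induction l generalizing o n2 with
  | nil => simp
  | cons c rest ih =>
    cases hc : (PySem.Chars.isdigit c || (c == '.')) with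
    | true =>
      rw [List.foldl_cons]
      simp only [pvBStep, hc, if_true, if_neg Bool.false_ne_true]
      rw [ih]
      simp [List.filter_cons, hc]
      intro h
      rw [h] at hc
      simpa using hc
    | false =>
      rw [List.foldl_cons]
      simp only [pvBStep, hc, Bool.false_eq_true, if_false]
      rw [ih]
      simp [List.filter_cons, hc]
      simpa using hc

-- with the flag up, B's loop computes the takeWhile/dropWhile decomposition
theorem pvBLoop_true (l n1 : List Char) :
    l.foldl pvBStep ((n1, [], []), true) =
      ((n1 ++ l.takeWhile (fun c => PySem.Chars.isdigit c || c == '.'),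
        (l.dropWhile (fun c => PySem.Chars.isdigit c || c == '.')).filter
          (fun c => !(PySem.Chars.isdigit c || c == '.')),
        (l.dropWhile (fun c => PySem.Chars.isdigit c || c == '.')).filter
          (fun c => PySem.Chars.isdigit c || c == '.')),
       (l.dropWhile (fun c => PySem.Chars.isdigit c || c == '.')).isEmpty) := by
  induction l generalizing n1 with
  | nil => simp
  | cons c rest ih =>
    cases hc : (PySem.Chars.isdigit c || (c == '.')) with
    | true =>
      rw [List.foldl_cons]
      simp only [pvBStep, hc, if_true]
      rw [ih (n1 ++ [c])]
      simp [List.takeWhile_cons, List.dropWhile_cons, hc]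
    | false =>
      rw [List.foldl_cons]
      simp only [pvBStep, hc, Bool.false_eq_true, if_false]
      rw [pvBLoop_false]
      simp [List.takeWhile_cons, List.dropWhile_cons, hc, List.filter_cons]
      simpa using hc

-- ===== VERDICT (by name: the statement is the Claim_ definition above) =====
theorem input_process_spec : Claim_equal_input_process := by
  intro equation _
  unfold Spec_input_process input_process input_process_alt
  generalize (PySem.Chars.join [] ((PySem.Chars.split? equation.toList [' ']).getD [])) = s
  have h1 := pvALoop1_eq s [] (by intro c hc; cases hc)
  simp only [List.nil_append] at h1
  simp only [h1, pvALoop2_eq, List.nil_append, pvBLoop_true]
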